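-- pv_equiv track=rewrite | github.com/glowisn/algorithm | 백준/Silver/25918. 북극곰은 괄호를 찢어/북극곰은 괄호를 찢어.py | check
-- ===== SOURCE A (Python) =====
-- def check(s,piv):
--     cnt = 0
--     maxx = 0
--     for al in s:
--         if piv == al:
--             cnt += 1
--             if maxx < cnt:
--                 maxx = cnt
--         else:
--             cnt -= 1
--     return maxx
-- ===== SOURCE B (Python) =====
-- def check(s, piv):
--     matches = [i for i, c in enumerate(s) if c == piv]
--     return max([0] + [2 * (j + 1) - (p + 1) for j, p in enumerate(matches)])
-- ===== Notes on version B (the rewrite author's own statement) =====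
-- stated objective: alternative
-- what changed: B replaces A's fused counter+running-max loop by collecting the match positions and computing each candidate maximum in closed form (2*(j+1)-(p+1) for the j-th match at index p), then taking max with 0.
import Mathlib
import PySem

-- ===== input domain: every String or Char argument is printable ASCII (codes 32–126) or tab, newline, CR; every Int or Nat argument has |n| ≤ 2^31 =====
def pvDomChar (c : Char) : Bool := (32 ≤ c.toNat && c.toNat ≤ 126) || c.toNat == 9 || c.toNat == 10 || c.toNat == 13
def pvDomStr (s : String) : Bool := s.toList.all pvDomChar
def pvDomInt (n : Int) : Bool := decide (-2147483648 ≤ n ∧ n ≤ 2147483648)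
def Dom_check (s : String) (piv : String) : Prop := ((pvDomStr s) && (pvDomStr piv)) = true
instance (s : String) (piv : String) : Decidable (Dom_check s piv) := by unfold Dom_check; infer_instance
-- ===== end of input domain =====

-- B computes the same answer from the list of match positions via the closed form
-- 2*(j+1)-(p+1) (value of the running count after the j-th match at index p), instead of
-- A's fused counter + running-max loop. Objective: alternative; same O(n) cost.

-- ===== PORT A =====
def check (s : String) (piv : String) : Int :=
  let st := s.toList.foldl (fun (st : Int × Int) al =>
    if piv == String.ofList [al] then
      let cnt := st.1 + 1
      let maxx := if st.2 < cnt then cnt else st.2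
      (cnt, maxx)
    else (st.1 - 1, st.2)) (0, 0)
  st.2

-- ===== PORT B =====
def check_alt (s : String) (piv : String) : Int :=
  let hits := ((PySem.List.enumerate s.toList 0).filter
      (fun ic => piv == String.ofList [ic.2])).map Prod.fst
  let vals := (PySem.List.enumerate hits 0).map
      (fun jp => 2 * (jp.1 + 1) - (jp.2 + 1))
  -- ports `max([0] + [...])`: max? of the nonempty list (0 :: vals)
  (PySem.List.max? ((0 : Int) :: vals) (fun x => x)).getD 0

-- ===== PRECONDITION & SPEC =====
def Spec_check (s : String) (piv : String) (out : Int) : Prop := out = check_alt s piv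
instance (s : String) (piv : String) (out : Int) : Decidable (Spec_check s piv out) := by unfold Spec_check; infer_instance

-- ===== CLAIM (what is proved, stated in full; the proofs are below) =====
def Claim_equal_check : Prop := ∀ (s : String) (piv : String), Dom_check s piv → Spec_check s piv (check s piv)

-- ===== LEMMAS AND PROOFS =====

-- the clamped "max running count" of a list, as a structural recursion
def pvN (piv : String) : List Char → Int
  | [] => 0
  | c :: t => max 0 ((if piv == String.ofList [c] then 1 else -1) + pvN piv t)

theorem pvN_nonneg (piv : String) (l : List Char) : 0 ≤ pvN piv l := by
  cases l <;> simp [pvN]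

theorem checkA_fold (piv : String) (l : List Char) :
    ∀ (cnt maxx : Int), cnt ≤ maxx →
      (l.foldl (fun (st : Int × Int) al =>
        if piv == String.ofList [al] then
          let cnt := st.1 + 1
          let maxx := if st.2 < cnt then cnt else st.2
          (cnt, maxx)
        else (st.1 - 1, st.2)) (cnt, maxx)).2 = max maxx (cnt + pvN piv l) := by
  induction l with
  | nil => intro cnt maxx h; simp [pvN]; omega
  | cons c t ih =>
    intro cnt maxx h
    by_cases hc : piv == String.ofList [c]
    · simp only [List.foldl_cons, hc, if_pos, pvN]
      rw [ih (cnt + 1) (if maxx < cnt + 1 then cnt + 1 else maxx) (by split <;> omega)]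
      have := pvN_nonneg piv t
      split <;> omega
    · simp only [List.foldl_cons, hc, Bool.false_eq_true, if_false, pvN]
      rw [ih (cnt - 1) maxx (by omega)]
      have := pvN_nonneg piv t
      omega

-- B's value list, as a function of the start index i and the match count j
def pvVals (piv : String) (l : List Char) (i j : Int) : List Int :=
  ((PySem.List.enumerate (((PySem.List.enumerate l i).filter
      (fun ic => piv == String.ofList [ic.2])).map Prod.fst) j).map
      (fun jp => 2 * (jp.1 + 1) - (jp.2 + 1)))

theorem checkB_fold (piv : String) (l : List Char) :
    ∀ (i j m : Int), 2 * j - i ≤ m →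
      (pvVals piv l i j).foldl max m = max m (2 * j - i + pvN piv l) := by
  induction l with
  | nil => intro i j m h; simp [pvVals, PySem.List.enumerate_nil, pvN]; omega
  | cons c t ih =>
    intro i j m h
    by_cases hc : piv == String.ofList [c]
    · have hv : pvVals piv (c :: t) i j
          = (2 * (j + 1) - (i + 1)) :: pvVals piv t (i + 1) (j + 1) := by
        simp [pvVals, PySem.List.enumerate_cons, hc]
      rw [hv]
      simp only [List.foldl_cons]
      rw [ih (i + 1) (j + 1) (max m (2 * (j + 1) - (i + 1))) (by omega)]
      have := pvN_nonneg piv t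
      simp only [pvN, hc, if_pos]
      omega
    · have hv : pvVals piv (c :: t) i j = pvVals piv t (i + 1) j := by
        simp [pvVals, PySem.List.enumerate_cons, hc]
      rw [hv, ih (i + 1) j m (by omega)]
      have := pvN_nonneg piv t
      simp only [pvN, hc, Bool.false_eq_true, if_false]
      omega

theorem max?_cons_foldl (a : Int) (l : List Int) :
    PySem.List.max? (a :: l) (fun x => x) = some (l.foldl max a) := by
  induction l generalizing a with
  | nil => simp [PySem.List.max?]
  | cons x t ih =>
    have h1 : PySem.List.max? (a :: x :: t) (fun x => x)
        = PySem.List.max? (max a x :: t) (fun x => x) := by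
      simp only [PySem.List.max?, List.foldl_cons]
      congr 1
      rw [max_def]
      split_ifs <;> simp_all <;> omega
    rw [h1, ih, List.foldl_cons]

-- ===== VERDICT (by name: the statement is the Claim_ definition above) =====
theorem check_spec : Claim_equal_check := by
  intro s piv _
  unfold Spec_check check check_alt
  rw [checkA_fold piv s.toList 0 0 le_rfl]
  show _ = (PySem.List.max? ((0 : Int) :: pvVals piv s.toList 0 0) (fun x => x)).getD 0
  rw [max?_cons_foldl, checkB_fold piv s.toList 0 0 0 (by omega)]
  simp
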